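-- pv_equiv track=rewrite | github.com/bpater1/HW1 | hw1q9.py | optimize_mrna_sequence
-- ===== SOURCE A (Python) =====
-- def optimize_mrna_sequence(amino_acid_sequence):
--     codon_table = {
--         "A": ["GCU", "GCC", "GCA", "GCG"],
--         "C": ["UGU", "UGC"],
--         "D": ["GAU", "GAC"],
--         "E": ["GAA", "GAG"],
--         "F": ["UUU", "UUC"],
--         "G": ["GGU", "GGC", "GGA", "GGG"],
--         "H": ["CAU", "CAC"],
--         "I": ["AUU", "AUC", "AUA"],
--         "K": ["AAA", "AAG"],
--         "L": ["UUA", "UUG", "CUU", "CUC", "CUA", "CUG"],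
--         "M": ["AUG"],
--         "N": ["AAU", "AAC"],
--         "P": ["CCU", "CCC", "CCA", "CCG"],
--         "Q": ["CAA", "CAG"],
--         "R": ["CGU", "CGC", "CGA", "CGG", "AGA", "AGG"],
--         "S": ["UCU", "UCC", "UCA", "UCG", "AGU", "AGC"],
--         "T": ["ACU", "ACC", "ACA", "ACG"],
--         "V": ["GUU", "GUC", "GUA", "GUG"],
--         "W": ["UGG"],
--         "Y": ["UAU", "UAC"],
--     }
--
--     def find_optimal_codon(amino_acid):
--         codons = codon_table.get(amino_acid, [""])  # Use an empty string as a fallback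
--         codons.sort(key=lambda codon: (-codon.count("C"), -codon.count("G"), codon))
--         return codons[0]
--
--     # Convert the input amino acid sequence to uppercase
--     amino_acid_sequence = amino_acid_sequence.upper()
--
--     mrna_sequence = ""
--     for amino_acid in amino_acid_sequence:
--         if amino_acid in codon_table:
--             mrna_sequence += find_optimal_codon(amino_acid)
--
--     return mrna_sequence
-- ===== SOURCE B (Python) =====
-- # B: precomputed table of the GC-richest codon per amino acid (max C-count, then
-- # max G-count, then lexicographically smallest), one lookup pass instead of
-- # sorting a codon list for every character.
-- _OPT = {
--     "A": "GCC", "C": "UGC", "D": "GAC", "E": "GAG", "F": "UUC",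
--     "G": "GGC", "H": "CAC", "I": "AUC", "K": "AAG", "L": "CUC",
--     "M": "AUG", "N": "AAC", "P": "CCC", "Q": "CAG", "R": "CGC",
--     "S": "UCC", "T": "ACC", "V": "GUC", "W": "UGG", "Y": "UAC",
-- }
--
--
-- def optimize_mrna_sequence(amino_acid_sequence):
--     return "".join(
--         _OPT[aa] for aa in amino_acid_sequence.upper() if aa in _OPT
--     )
-- ===== Notes on version B (the rewrite author's own statement) =====
-- stated objective: faster
-- what changed: B replaces A's per-character re-sort of the amino acid's codon list by a precomputed literal amino-acid-to-optimal-codon table and a single lookup-and-join pass over the uppercased sequence.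
import Mathlib
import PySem

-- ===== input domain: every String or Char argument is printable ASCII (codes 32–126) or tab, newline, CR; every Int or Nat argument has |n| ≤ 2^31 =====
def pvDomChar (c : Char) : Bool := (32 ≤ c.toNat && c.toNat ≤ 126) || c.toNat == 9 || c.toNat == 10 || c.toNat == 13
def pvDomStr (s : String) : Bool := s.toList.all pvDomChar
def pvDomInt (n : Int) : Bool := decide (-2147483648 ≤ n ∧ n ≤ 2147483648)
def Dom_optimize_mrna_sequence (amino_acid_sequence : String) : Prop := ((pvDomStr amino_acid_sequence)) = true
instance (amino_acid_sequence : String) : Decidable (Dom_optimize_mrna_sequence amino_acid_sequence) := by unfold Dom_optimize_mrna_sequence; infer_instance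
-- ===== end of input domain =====

-- B replaces A's per-character re-sort of the codon list with a precomputed
-- amino-acid → GC-richest-codon table and one lookup pass (objective: faster).
-- Internal codon strings are carried as List Char (PySem.Chars side), exact for ASCII.

-- ===== PORT A =====
-- Python dict keys are 1-character strings iterated as the characters of the
-- uppercased input, so they are modelled as Char; codon strings as List Char.
def pvCodonTable : PySem.Dict Char (List (List Char)) := PySem.Dict.mk
  [ ('A', [['G','C','U'], ['G','C','C'], ['G','C','A'], ['G','C','G']]),
    ('C', [['U','G','U'], ['U','G','C']]),
    ('D', [['G','A','U'], ['G','A','C']]),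
    ('E', [['G','A','A'], ['G','A','G']]),
    ('F', [['U','U','U'], ['U','U','C']]),
    ('G', [['G','G','U'], ['G','G','C'], ['G','G','A'], ['G','G','G']]),
    ('H', [['C','A','U'], ['C','A','C']]),
    ('I', [['A','U','U'], ['A','U','C'], ['A','U','A']]),
    ('K', [['A','A','A'], ['A','A','G']]),
    ('L', [['U','U','A'], ['U','U','G'], ['C','U','U'], ['C','U','C'], ['C','U','A'], ['C','U','G']]),
    ('M', [['A','U','G']]),
    ('N', [['A','A','U'], ['A','A','C']]),
    ('P', [['C','C','U'], ['C','C','C'], ['C','C','A'], ['C','C','G']]),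
    ('Q', [['C','A','A'], ['C','A','G']]),
    ('R', [['C','G','U'], ['C','G','C'], ['C','G','A'], ['C','G','G'], ['A','G','A'], ['A','G','G']]),
    ('S', [['U','C','U'], ['U','C','C'], ['U','C','A'], ['U','C','G'], ['A','G','U'], ['A','G','C']]),
    ('T', [['A','C','U'], ['A','C','C'], ['A','C','A'], ['A','C','G']]),
    ('V', [['G','U','U'], ['G','U','C'], ['G','U','A'], ['G','U','G']]),
    ('W', [['U','G','G']]),
    ('Y', [['U','A','U'], ['U','A','C']]) ]

-- Python's sort key tuple (-codon.count("C"), -codon.count("G"), codon) compared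
-- lexicographically, written out by hand (a 3-component tuple key is not a PySem
-- primitive); exact: Int components, then code-point string comparison (Chars.strLt).
def pvKeyLt (a b : List Char) : Bool :=
  let ca : Int := -(PySem.Chars.count a ['C'] : Int)
  let cb : Int := -(PySem.Chars.count b ['C'] : Int)
  let ga : Int := -(PySem.Chars.count a ['G'] : Int)
  let gb : Int := -(PySem.Chars.count b ['G'] : Int)
  if ca ≠ cb then decide (ca < cb)
  else if ga ≠ gb then decide (ga < gb)
  else PySem.Chars.strLt a b

-- codons.sort(key=…) — Python's stable sort as the insertion-sort fold named by
-- PySem.List.sorted_eq_foldl_insertBy; then codons[0] (never empty: fallback is [""]).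
def pvFindOptimalCodon (amino_acid : Char) : List Char :=
  (PySem.Dict.getD pvCodonTable amino_acid [[]]).foldl
    (fun acc x => PySem.List.insertBy pvKeyLt x acc) [] |>.headD []

def optimize_mrna_sequence (amino_acid_sequence : String) : String :=
  String.ofList
    ((PySem.Str.upper amino_acid_sequence).toList.foldl
      (fun acc c => if PySem.Dict.contains pvCodonTable c then acc ++ pvFindOptimalCodon c else acc)
      ([] : List Char))

-- ===== PORT B =====
def pvOpt : PySem.Dict Char (List Char) := PySem.Dict.mk
  [ ('A', ['G','C','C']), ('C', ['U','G','C']), ('D', ['G','A','C']), ('E', ['G','A','G']),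
    ('F', ['U','U','C']), ('G', ['G','G','C']), ('H', ['C','A','C']), ('I', ['A','U','C']),
    ('K', ['A','A','G']), ('L', ['C','U','C']), ('M', ['A','U','G']), ('N', ['A','A','C']),
    ('P', ['C','C','C']), ('Q', ['C','A','G']), ('R', ['C','G','C']), ('S', ['U','C','C']),
    ('T', ['A','C','C']), ('V', ['G','U','C']), ('W', ['U','G','G']), ('Y', ['U','A','C']) ]

-- ''.join(_OPT[aa] for aa in s.upper() if aa in _OPT)
def optimize_mrna_sequence_alt (amino_acid_sequence : String) : String :=
  String.ofList
    (((PySem.Str.upper amino_acid_sequence).toList.filterMap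
        (fun c => PySem.Dict.get? pvOpt c)).flatten)

-- ===== PRECONDITION & SPEC =====
def Spec_optimize_mrna_sequence (amino_acid_sequence : String) (out : String) : Prop := out = optimize_mrna_sequence_alt amino_acid_sequence
instance (amino_acid_sequence : String) (out : String) : Decidable (Spec_optimize_mrna_sequence amino_acid_sequence out) := by unfold Spec_optimize_mrna_sequence; infer_instance

-- ===== CLAIM (what is proved, stated in full; the proofs are below) =====
def Claim_equal_optimize_mrna_sequence : Prop := ∀ (amino_acid_sequence : String), Dom_optimize_mrna_sequence amino_acid_sequence → Spec_optimize_mrna_sequence amino_acid_sequence (optimize_mrna_sequence amino_acid_sequence)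

-- ===== LEMMAS AND PROOFS =====

-- per-character agreement of A's loop body with B's lookup
theorem pv_step_eq (c : Char) :
    (if PySem.Dict.contains pvCodonTable c then pvFindOptimalCodon c else []) =
      ((PySem.Dict.get? pvOpt c).getD []) := by
  by_cases hA : c = 'A'; · subst hA; decide
  by_cases hC : c = 'C'; · subst hC; decide
  by_cases hD : c = 'D'; · subst hD; decide
  by_cases hE : c = 'E'; · subst hE; decide
  by_cases hF : c = 'F'; · subst hF; decide
  by_cases hG : c = 'G'; · subst hG; decide
  by_cases hH : c = 'H'; · subst hH; decide
  by_cases hI : c = 'I'; · subst hI; decide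
  by_cases hK : c = 'K'; · subst hK; decide
  by_cases hL : c = 'L'; · subst hL; decide
  by_cases hM : c = 'M'; · subst hM; decide
  by_cases hN : c = 'N'; · subst hN; decide
  by_cases hP : c = 'P'; · subst hP; decide
  by_cases hQ : c = 'Q'; · subst hQ; decide
  by_cases hR : c = 'R'; · subst hR; decide
  by_cases hS : c = 'S'; · subst hS; decide
  by_cases hT : c = 'T'; · subst hT; decide
  by_cases hV : c = 'V'; · subst hV; decide
  by_cases hW : c = 'W'; · subst hW; decide
  by_cases hY : c = 'Y'; · subst hY; decide
  simp [pvCodonTable, pvOpt, PySem.Dict.contains, PySem.Dict.get?,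
        Ne.symm hA, Ne.symm hC, Ne.symm hD, Ne.symm hE, Ne.symm hF, Ne.symm hG, Ne.symm hH, Ne.symm hI, Ne.symm hK, Ne.symm hL, Ne.symm hM, Ne.symm hN, Ne.symm hP, Ne.symm hQ, Ne.symm hR, Ne.symm hS, Ne.symm hT, Ne.symm hV, Ne.symm hW, Ne.symm hY]

-- flatten ∘ filterMap as a flatMap with default []
theorem pv_flatten_filterMap (l : List Char) :
    (l.filterMap (fun c => PySem.Dict.get? pvOpt c)).flatten =
      l.flatMap (fun c => (PySem.Dict.get? pvOpt c).getD []) := by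
  induction l with
  | nil => rfl
  | cons c t ih =>
    simp only [List.filterMap_cons, List.flatMap_cons, ← ih]
    cases PySem.Dict.get? pvOpt c <;> simp

-- ===== VERDICT (by name: the statement is the Claim_ definition above) =====
theorem optimize_mrna_sequence_spec : Claim_equal_optimize_mrna_sequence := by
  intro s _
  show _ = _
  unfold optimize_mrna_sequence optimize_mrna_sequence_alt
  rw [pv_flatten_filterMap]
  have hcongr := PySem.List.foldl_congr_mem
      (l := (PySem.Str.upper s).toList) (init := ([] : List Char))
      (f := fun acc c => if PySem.Dict.contains pvCodonTable c then acc ++ pvFindOptimalCodon c else acc)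
      (g := fun acc c => acc ++ (if PySem.Dict.contains pvCodonTable c then pvFindOptimalCodon c else []))
      (fun acc c _ => by beta_reduce; split <;> simp)
  rw [hcongr, PySem.List.foldl_append_eq_flatMap]
  simp only [pv_step_eq, List.nil_append]
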